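-- pv_equiv track=rewrite | github.com/JorrikE/AdventOfCode2023 | d1trebuchet/part2.py | get_first_last_numeric
-- ===== SOURCE A (Python) =====
-- from typing import Final
--
-- NUM_DICT: Final[dict[str, str]] = {"one": "1",
--                                    "two": "2",
--                                    "three": "3",
--                                    "four": "4",
--                                    "five": "5",
--                                    "six": "6",
--                                    "seven": "7",
--                                    "eight": "8",
--                                    "nine": "9",
--                                    "1": "1",
--                                    "2": "2",
--                                    "3": "3",
--                                    "4": "4",
--                                    "5": "5",
--                                    "6": "6",
--                                    "7": "7",
--                                    "8": "8",
--                                    "9": "9"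
--                                    }
--
-- def get_first_last_numeric(input_str: str) -> tuple[str, str]:
--     # Who needs regex when you have dictionaries!
--     first_numeric_index: int = float('inf')
--     first_numeric: str = None
--     last_numeric_index: int = -float('inf')
--     last_numeric: str = None
--     for key in list(NUM_DICT.keys()):
--         key_index: int = None
--         for _ in range(input_str.count(key)):
--             key_index = input_str.index(key, key_index)
--             if key_index < first_numeric_index:
--                 first_numeric_index = key_index
--                 first_numeric = NUM_DICT[key]
--             if key_index > last_numeric_index:
--                 last_numeric_index = key_index
--                 last_numeric = NUM_DICT[key]
--             key_index = key_index + 1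
--     return (first_numeric, last_numeric)
-- ===== SOURCE B (Python) =====
-- from typing import Final
--
-- NUM_DICT: Final[dict[str, str]] = {"one": "1",
--                                    "two": "2",
--                                    "three": "3",
--                                    "four": "4",
--                                    "five": "5",
--                                    "six": "6",
--                                    "seven": "7",
--                                    "eight": "8",
--                                    "nine": "9",
--                                    "1": "1",
--                                    "2": "2",
--                                    "3": "3",
--                                    "4": "4",
--                                    "5": "5",
--                                    "6": "6",
--                                    "7": "7",
--                                    "8": "8",
--                                    "9": "9"
--                                    }
--
--
-- def _match_at(input_str: str, i: int):
--     # the token (if any) starting at position i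
--     for key, val in NUM_DICT.items():
--         if input_str.startswith(key, i):
--             return val
--     return None
--
--
-- def get_first_last_numeric(input_str: str) -> tuple[str, str]:
--     n = len(input_str)
--     first = None
--     for i in range(n):
--         first = _match_at(input_str, i)
--         if first is not None:
--             break
--     last = None
--     for i in reversed(range(n)):
--         last = _match_at(input_str, i)
--         if last is not None:
--             break
--     return (first, last)
-- ===== Notes on version B (the rewrite author's own statement) =====
-- stated objective: simpler
-- what changed: Replaces A's per-key occurrence enumeration (str.count plus a repeated str.index loop with running min/max index bookkeeping over all 18 keys) by two positional scans: left-to-right returning the first position where some token starts, and right-to-left for the last.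
-- outside the precondition, e.g. on get_first_last_numeric('abc'): A returns (None, None), B returns (None, None)
import Mathlib
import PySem

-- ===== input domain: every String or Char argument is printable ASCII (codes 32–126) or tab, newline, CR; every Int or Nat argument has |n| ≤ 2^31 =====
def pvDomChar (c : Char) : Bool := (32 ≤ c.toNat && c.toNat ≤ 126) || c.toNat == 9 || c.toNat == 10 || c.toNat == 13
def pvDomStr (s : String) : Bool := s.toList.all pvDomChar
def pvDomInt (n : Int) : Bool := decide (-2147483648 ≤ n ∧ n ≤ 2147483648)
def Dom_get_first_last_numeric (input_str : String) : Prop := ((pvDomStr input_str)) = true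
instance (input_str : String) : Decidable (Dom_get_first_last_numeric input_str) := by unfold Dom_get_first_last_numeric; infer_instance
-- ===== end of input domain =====

-- B replaces A's per-key count/index occurrence enumeration with min/max bookkeeping by two
-- positional scans (left-to-right for the first token, right-to-left for the last); objective: simpler.

-- NUM_DICT as an association list in insertion order (shared module constant of both programs)
def numDict : List (String × String) :=
  [("one", "1"), ("two", "2"), ("three", "3"), ("four", "4"), ("five", "5"),
   ("six", "6"), ("seven", "7"), ("eight", "8"), ("nine", "9"),
   ("1", "1"), ("2", "2"), ("3", "3"), ("4", "4"), ("5", "5"),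
   ("6", "6"), ("7", "7"), ("8", "8"), ("9", "9")]

-- ===== PORT A =====
-- NUM_DICT[key]: first-match association-list lookup
def dictGetD (k : String) : String := ((numDict.lookup k).getD "")

-- state: ((first_numeric_index, first_numeric), (last_numeric_index, last_numeric));
-- 'none' in an index slot encodes float('inf') / -float('inf'), 'none' in a value slot encodes Python None
def StA : Type := (Option Int × Option String) × (Option Int × Option String)

-- key_index < first_numeric_index (first_numeric_index = none means +inf)
def ltInf (j : Int) (fi : Option Int) : Bool := match fi with | none => true | some v => decide (j < v)
-- key_index > last_numeric_index (last_numeric_index = none means -inf)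
def gtNegInf (j : Int) (li : Option Int) : Bool := match li with | none => true | some v => decide (v < j)

-- the two 'if' updates of A's loop body at found index j for key value v
def stepA (v : String) (σ : StA) (j : Int) : StA :=
  let fp := if ltInf j σ.1.1 then ((some j, some v) : Option Int × Option String) else σ.1
  let lp := if gtNegInf j σ.2.1 then ((some j, some v) : Option Int × Option String) else σ.2
  (fp, lp)

-- 'for _ in range(input_str.count(key)): key_index = input_str.index(key, key_index); …; key_index += 1'
-- Python str.index raises ValueError when absent; that branch is unreachable here because the
-- iteration count is range(input_str.count(key)), so the port leaves the state unchanged there.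
def innerA (cs : List Char) (k v : String) : Nat → Option Int → StA → StA
  | 0, _, σ => σ
  | n + 1, ki, σ =>
    let j := PySem.Chars.findFrom cs k.toList (ki.getD 0)
    if j = -1 then σ
    else innerA cs k v n (some (j + 1)) (stepA v σ j)

def get_first_last_numeric (input_str : String) : String × String :=
  let cs := input_str.toList
  let σ := (numDict.map Prod.fst).foldl
      (fun σ k => innerA cs k (dictGetD k) (PySem.Chars.count cs k.toList) none σ)
      ((none, none), (none, none))
  -- Python returns (first_numeric, last_numeric); a None result (no token) is excluded by Pre_
  (σ.1.2.getD "", σ.2.2.getD "")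

-- ===== PORT B =====
-- 'for key, val in NUM_DICT.items(): if input_str.startswith(key, i): return val'
def matchAt (cs : List Char) (i : Nat) : Option String :=
  numDict.findSome? (fun kv =>
    if PySem.Chars.startswith (cs.drop i) kv.1.toList then some kv.2 else none)

def get_first_last_numeric_alt (input_str : String) : String × String :=
  let cs := input_str.toList
  let first := (List.range cs.length).findSome? (matchAt cs)        -- for i in range(n)
  let last := (List.range cs.length).reverse.findSome? (matchAt cs) -- for i in reversed(range(n))
  -- B returns (None, None) when no token occurs; excluded by Pre_
  (first.getD "", last.getD "")

-- ===== PRECONDITION & SPEC =====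
-- Pre_ excludes strings containing none of the 18 tokens: there Python A (and B) return
-- (None, None), which is not a pair of strings.
def Pre_get_first_last_numeric (input_str : String) : Prop :=
  (numDict.any (fun kv => PySem.Str.isIn kv.1 input_str)) = true
instance (input_str : String) : Decidable (Pre_get_first_last_numeric input_str) := by
  unfold Pre_get_first_last_numeric; infer_instance

def pvWitness_get_first_last_numeric : String := "a1b"

def Spec_get_first_last_numeric (input_str : String) (out : String × String) : Prop := out = get_first_last_numeric_alt input_str
instance (input_str : String) (out : String × String) : Decidable (Spec_get_first_last_numeric input_str out) := by unfold Spec_get_first_last_numeric; infer_instance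

-- ===== CLAIM (what is proved, stated in full; the proofs are below) =====
def Claim_equal_get_first_last_numeric : Prop := ∀ (input_str : String), Dom_get_first_last_numeric input_str → Pre_get_first_last_numeric input_str → Spec_get_first_last_numeric input_str (get_first_last_numeric input_str)

-- ===== LEMMAS AND PROOFS =====

-- ---------- proof-side definitions ----------

-- all positions where sub occurs in s (increasing)
def occL (s sub : List Char) : List Nat :=
  (List.range s.length).filter (fun i => sub.isPrefixOf (s.drop i))

-- the occurrences at position ≥ t
def occFrom (s sub : List Char) (t : Nat) : List Nat :=
  (occL s sub).filter (fun i => decide (t ≤ i))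

-- all (position, token value) pairs, grouped by key in dict order
def pairsOf (cs : List Char) : List (Nat × String) :=
  numDict.flatMap (fun p => (occL cs p.1.toList).map (fun j => (j, p.2)))

-- the action of stepA on the (first_numeric_index, first_numeric) component
def fstep (p : Option Int × Option String) (jv : Nat × String) : Option Int × Option String :=
  if ltInf (↑jv.1) p.1 then (some (↑jv.1), some jv.2) else p

-- the action of stepA on the (last_numeric_index, last_numeric) component
def lstep (p : Option Int × Option String) (jv : Nat × String) : Option Int × Option String :=
  if gtNegInf (↑jv.1) p.1 then (some (↑jv.1), some jv.2) else p

-- ---------- facts about the literal key table (by decide) ----------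

theorem key_nonempty : ∀ p ∈ numDict, p.1.toList ≠ [] := by decide

theorem key_prefix_unique : ∀ p ∈ numDict, ∀ q ∈ numDict, p.1.toList <+: q.1.toList → p = q := by decide

theorem key_borderless' : ∀ p ∈ numDict, ∀ d ∈ List.range p.1.toList.length,
    d ≠ 0 → ¬ (p.1.toList.drop d <+: p.1.toList) := by decide

theorem key_borderless (p : String × String) (hp : p ∈ numDict) :
    ∀ d, 0 < d → d < p.1.toList.length → ¬ (p.1.toList.drop d <+: p.1.toList) := by
  intro d hd hdl
  exact key_borderless' p hp d (List.mem_range.mpr hdl) (Nat.pos_iff_ne_zero.mp hd)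

theorem lookup_mem : ∀ p ∈ numDict, dictGetD p.1 = p.2 := by decide

-- ---------- generic helpers ----------

theorem prefix_of_append_of_le {l₁ l₂ l₃ : List Char} (h : l₁ <+: l₂ ++ l₃)
    (hl : l₂.length ≤ l₁.length) : l₂ <+: l₁ := by
  obtain ⟨t, ht⟩ := h
  have h1 : (l₂ ++ l₃).take l₂.length = l₂ := by simp
  rw [← ht, List.take_append_of_le_length hl] at h1
  rw [← h1]
  exact List.take_prefix _ _

theorem occL_pairwise (s sub : List Char) : (occL s sub).Pairwise (· < ·) := by
  exact List.Pairwise.sublist (List.filter_sublist) List.pairwise_lt_range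

theorem mem_occL {s sub : List Char} {j : Nat} :
    j ∈ occL s sub ↔ j < s.length ∧ sub <+: s.drop j := by
  simp [occL, List.mem_filter, List.mem_range, List.isPrefixOf_iff_prefix]

theorem filter_ge_step {l : List Nat} (hl : l.Pairwise (· < ·)) :
    ∀ t j rest, l.filter (fun i => decide (t ≤ i)) = j :: rest →
      t ≤ j ∧ l.filter (fun i => decide (j + 1 ≤ i)) = rest := by
  induction l with
  | nil => intro t j rest h; simp at h
  | cons x tl ih =>
    intro t j rest h
    have hx_tl : ∀ y ∈ tl, x < y := (List.pairwise_cons.mp hl).1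
    have hl' : tl.Pairwise (· < ·) := (List.pairwise_cons.mp hl).2
    by_cases hx : t ≤ x
    · rw [List.filter_cons_of_pos (by simpa using hx)] at h
      injection h with h1 h2
      subst h1
      refine ⟨hx, ?_⟩
      have htl : List.filter (fun i => decide (x + 1 ≤ i)) tl = tl :=
        List.filter_eq_self.mpr (fun y hy => by simpa using hx_tl y hy)
      have htl2 : List.filter (fun i => decide (t ≤ i)) tl = tl :=
        List.filter_eq_self.mpr
          (fun y hy => by simp; exact le_trans hx (le_of_lt (hx_tl y hy)))
      rw [List.filter_cons_of_neg (by simp), htl, ← h2, htl2]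
    · rw [List.filter_cons_of_neg (by simpa using hx)] at h
      obtain ⟨htj, hrest⟩ := ih hl' t j rest h
      refine ⟨htj, ?_⟩
      rw [List.filter_cons_of_neg (by simp; omega), hrest]

-- ---------- count = number of occurrences (borderless, nonempty sub) ----------

theorem occL_nil (sub : List Char) : occL [] sub = [] := by
  simp [occL]

theorem occL_length_cons_of_not_prefix {sub : List Char} {h : Char} {t : List Char}
    (hnp : ¬ sub <+: h :: t) : (occL (h :: t) sub).length = (occL t sub).length := by
  unfold occL
  rw [show (h :: t).length = t.length + 1 from rfl, List.range_succ_eq_map,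
    List.filter_cons_of_neg (by simpa using hnp), List.filter_map]
  simp [Function.comp_def]

theorem occL_length_of_prefix {sub s : List Char} (hne : sub ≠ [])
    (hb : ∀ d, 0 < d → d < sub.length → ¬ (sub.drop d <+: sub))
    (hp : sub <+: s) :
    (occL s sub).length = 1 + (occL (s.drop sub.length) sub).length := by
  have hm : 1 ≤ sub.length := by
    cases sub with
    | nil => exact absurd rfl hne
    | cons a l => simp
  have hs : sub.length ≤ s.length := hp.length_le
  obtain ⟨r, hr⟩ := hp
  -- split range s.length at sub.length
  have hsplit : s.length = sub.length + (s.length - sub.length) := by omega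
  unfold occL
  rw [hsplit, List.range_add, List.filter_append, List.length_append]
  -- low part: exactly the occurrence at 0
  have hlow : (List.filter (fun i => sub.isPrefixOf (s.drop i)) (List.range sub.length)) = [0] := by
    rw [show sub.length = (sub.length - 1) + 1 by omega, List.range_succ_eq_map,
      List.filter_cons_of_pos (by simp [List.isPrefixOf_iff_prefix]; exact ⟨r, hr⟩),
      List.filter_map]
    have hnil : List.filter ((fun i => sub.isPrefixOf (s.drop i)) ∘ Nat.succ)
        (List.range (sub.length - 1)) = [] := by
      rw [List.filter_eq_nil_iff]
      intro d hd hc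
      rw [List.mem_range] at hd
      simp only [Function.comp_def, Nat.succ_eq_add_one,
        List.isPrefixOf_iff_prefix] at hc
      have hpre : sub <+: s.drop (d + 1) := hc
      have hdec : s.drop (d + 1) = sub.drop (d + 1) ++ r := by
        rw [← hr, List.drop_append_of_le_length (by omega)]
      rw [hdec] at hpre
      have hbord : sub.drop (d + 1) <+: sub :=
        prefix_of_append_of_le hpre (by simp)
      exact hb (d + 1) (by omega) (by omega) hbord
    rw [hnil]
    simp
  rw [hlow, List.filter_map, List.length_map]
  have hcongr : List.filter ((fun i => sub.isPrefixOf (List.drop i s)) ∘ fun x => sub.length + x)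
      (List.range (s.length - sub.length)) =
      List.filter (fun i => sub.isPrefixOf (List.drop i (List.drop sub.length s)))
        (List.range (s.length - sub.length)) := by
    apply List.filter_congr
    intro j hj
    simp [List.drop_drop]
  rw [hcongr, List.length_drop]
  simp

theorem count_go_spec (sub : List Char) (hne : sub ≠ [])
    (hb : ∀ d, 0 < d → d < sub.length → ¬ (sub.drop d <+: sub)) :
    ∀ fuel s acc, s.length ≤ fuel →
      PySem.Chars.count.go sub fuel s acc = acc + (occL s sub).length := by
  intro fuel
  induction fuel with
  | zero =>
    intro s acc hlen
    have hs : s = [] := List.eq_nil_of_length_eq_zero (by omega)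
    subst hs
    rw [occL_nil]
    simp [PySem.Chars.count.go]
  | succ n ih =>
    intro s acc hlen
    cases s with
    | nil =>
      rw [occL_nil]
      simp [PySem.Chars.count.go]
    | cons h t =>
      rw [PySem.Chars.count.go]
      by_cases hpre : sub <+: h :: t
      · rw [if_pos (List.isPrefixOf_iff_prefix.mpr hpre)]
        have hm : 1 ≤ sub.length := by
          cases sub with
          | nil => exact absurd rfl hne
          | cons a l => simp
        have hlen' : ((h :: t).drop sub.length).length ≤ n := by
          rw [List.length_drop]
          simp at hlen ⊢
          omega
        rw [ih _ (acc + 1) hlen', occL_length_of_prefix hne hb hpre]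
        omega
      · rw [if_neg (fun hc => hpre (List.isPrefixOf_iff_prefix.mp hc))]
        rw [ih t acc (by simp at hlen; omega), occL_length_cons_of_not_prefix hpre]

theorem count_eq_occL (sub s : List Char) (hne : sub ≠ [])
    (hb : ∀ d, 0 < d → d < sub.length → ¬ (sub.drop d <+: sub)) :
    PySem.Chars.count s sub = (occL s sub).length := by
  have hie : sub.isEmpty = false := by
    cases sub with
    | nil => exact absurd rfl hne
    | cons a l => rfl
  rw [PySem.Chars.count, hie]
  simpa using count_go_spec sub hne hb s.length s 0 le_rfl

-- ---------- findFrom finds the head of occFrom ----------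

theorem findFrom_head {s sub : List Char} {t j : Nat} {rest : List Nat} (hne : sub ≠ [])
    (ht : t ≤ s.length) (h : occFrom s sub t = j :: rest) :
    PySem.Chars.findFrom s sub (↑t) none = (↑j : Int) := by
  have hjmem : j ∈ occFrom s sub t := by rw [h]; exact List.mem_cons_self
  have hj : j ∈ occL s sub ∧ t ≤ j := by
    have := List.mem_filter.mp hjmem
    simpa using this
  obtain ⟨hjo, htj⟩ := hj
  obtain ⟨hjlen, hjpre⟩ := mem_occL.mp hjo
  -- findFrom does not return -1
  have hinf : sub <:+: s.drop t := by
    rw [← PySem.Chars.isIn_iff_infix, ← PySem.Chars.exists_prefix_drop_iff_isIn]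
    refine ⟨j - t, ?_⟩
    rw [List.drop_drop, show t + (j - t) = j by omega]
    exact hjpre
  have hne1 : PySem.Chars.findFrom s sub (↑t) none ≠ -1 := by
    intro hc
    rw [PySem.Chars.findFrom_natCast_eq_neg_one_iff s sub t ht] at hc
    exact hc hinf
  obtain ⟨h1, h2, h3⟩ := PySem.Chars.findFrom_natCast_spec s sub t ht hne1
  set r := PySem.Chars.findFrom s sub (↑t) none with hr
  have hr0 : 0 ≤ r := le_trans (Int.natCast_nonneg t) h1
  have hrt : t ≤ r.toNat := by omega
  -- r.toNat is an occurrence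
  have hrlen : r.toNat < s.length := by
    by_contra hc
    rw [List.drop_eq_nil_of_le (by omega)] at h2
    exact hne (List.prefix_nil.mp h2)
  have hrmem : r.toNat ∈ occFrom s sub t := by
    unfold occFrom
    rw [List.mem_filter]
    exact ⟨mem_occL.mpr ⟨hrlen, h2⟩, by simpa using hrt⟩
  -- minimality of r among occurrences ≥ t forces r.toNat = j
  have hle : r.toNat ≤ j := by
    by_contra hc
    exact h3 j htj (by omega) hjpre
  have hocc_pw : (occFrom s sub t).Pairwise (· < ·) :=
    List.Pairwise.sublist (List.filter_sublist) (occL_pairwise s sub)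
  have hge : j ≤ r.toNat := by
    rw [h] at hrmem hocc_pw
    rcases List.mem_cons.mp hrmem with heq | hmem
    · omega
    · exact le_of_lt ((List.pairwise_cons.mp hocc_pw).1 _ hmem)
  have : r.toNat = j := by omega
  omega

-- ---------- the inner loop visits exactly occFrom ----------

theorem innerA_spec (cs : List Char) (k v : String) (hne : k.toList ≠ []) :
    ∀ (L : List Nat) (t : Nat) (ki : Option Int) (σ : StA), ki.getD 0 = (t : Int) →
      t ≤ cs.length → occFrom cs k.toList t = L →
      innerA cs k v L.length ki σ = L.foldl (fun σ (j : Nat) => stepA v σ (↑j)) σ := by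
  intro L
  induction L with
  | nil =>
    intro t ki σ hki ht hocc
    simp [innerA]
  | cons j rest ih =>
    intro t ki σ hki ht hocc
    have hjo : j ∈ occL cs k.toList ∧ t ≤ j := by
      have : j ∈ occFrom cs k.toList t := by rw [hocc]; exact List.mem_cons_self
      simpa [occFrom, List.mem_filter] using this
    have hjlen : j < cs.length := (mem_occL.mp hjo.1).1
    rw [List.length_cons, innerA, hki, findFrom_head hne ht hocc]
    rw [if_neg (by omega)]
    rw [List.foldl_cons]
    apply ih (j + 1) (some ((j : Int) + 1)) (stepA v σ (↑j)) (by push_cast; simp)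
      (by omega)
    exact (filter_ge_step (occL_pairwise cs k.toList) t j rest hocc).2

theorem innerA_occL (cs : List Char) (p : String × String) (hp : p ∈ numDict) (v : String) (σ : StA) :
    innerA cs p.1 v (PySem.Chars.count cs p.1.toList) none σ =
      (occL cs p.1.toList).foldl (fun σ (j : Nat) => stepA v σ (↑j)) σ := by
  have hne := key_nonempty p hp
  have hb := key_borderless p hp
  rw [count_eq_occL p.1.toList cs hne hb]
  have hocc : occFrom cs p.1.toList 0 = occL cs p.1.toList := by
    unfold occFrom
    exact List.filter_eq_self.mpr (fun a _ => by simp)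
  exact innerA_spec cs p.1 v hne (occL cs p.1.toList) 0 none σ (by simp) (by omega) hocc

-- ---------- flattening the two nested loops of A ----------

theorem foldl_foldl_flatMap {α β γ : Type} (l : List α) (g : α → List β) (f : γ → β → γ) (init : γ) :
    l.foldl (fun σ a => (g a).foldl f σ) init = (l.flatMap g).foldl f init := by
  induction l generalizing init with
  | nil => simp
  | cons a tl ih => simp [List.flatMap_cons, List.foldl_append, ih]

theorem A_fold_pairs (cs : List Char) :
    (numDict.map Prod.fst).foldl
      (fun σ k => innerA cs k (dictGetD k) (PySem.Chars.count cs k.toList) none σ)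
      (((none, none), (none, none)) : StA) =
    (pairsOf cs).foldl (fun σ jv => stepA jv.2 σ (↑jv.1)) (((none, none), (none, none)) : StA) := by
  rw [List.foldl_map]
  rw [PySem.List.foldl_congr_mem numDict _
    (fun σ p => (occL cs p.1.toList).foldl (fun σ (j : Nat) => stepA p.2 σ (↑j)) σ) _
    (fun σ p hp => by rw [lookup_mem p hp, innerA_occL cs p hp])]
  rw [show (fun σ p => (occL cs p.1.toList).foldl (fun σ (j : Nat) => stepA p.2 σ (↑j)) σ)
      = fun (σ : StA) (p : String × String) =>
        (((occL cs p.1.toList).map (fun j => (j, p.2))).foldl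
          (fun σ (jv : Nat × String) => stepA jv.2 σ (↑jv.1)) σ) from by
    funext σ p
    rw [List.foldl_map]]
  exact foldl_foldl_flatMap numDict _ _ _

theorem fold_split (L : List (Nat × String)) :
    ∀ a b, L.foldl (fun σ jv => stepA jv.2 σ (↑jv.1)) ((a, b) : StA) = (L.foldl fstep a, L.foldl lstep b) := by
  induction L with
  | nil => intro a b; simp
  | cons jv tl ih =>
    intro a b
    rw [List.foldl_cons, List.foldl_cons, List.foldl_cons,
      show stepA jv.2 (a, b) (↑jv.1) = (fstep a jv, lstep b jv) from rfl]
    exact ih _ _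

-- ---------- membership in pairsOf vs matchAt ----------

theorem mem_pairsOf {cs : List Char} {j : Nat} {v : String} :
    (j, v) ∈ pairsOf cs ↔ ∃ p ∈ numDict, p.2 = v ∧ j < cs.length ∧ p.1.toList <+: cs.drop j := by
  unfold pairsOf
  rw [List.mem_flatMap]
  constructor
  · rintro ⟨p, hp, hmem⟩
    rw [List.mem_map] at hmem
    obtain ⟨i, hio, hie⟩ := hmem
    obtain ⟨h1, h2⟩ := Prod.mk.injEq .. ▸ hie
    obtain ⟨hlen, hpre⟩ := mem_occL.mp hio
    exact ⟨p, hp, h2, h1 ▸ hlen, h1 ▸ hpre⟩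
  · rintro ⟨p, hp, hv, hlen, hpre⟩
    refine ⟨p, hp, ?_⟩
    rw [List.mem_map]
    exact ⟨j, mem_occL.mpr ⟨hlen, hpre⟩, by rw [hv]⟩

theorem matchAt_eq_some_iff_aux {cs : List Char} {j : Nat} {v : String}
    (h : matchAt cs j = some v) :
    ∃ p ∈ numDict, p.1.toList <+: cs.drop j ∧ p.2 = v := by
  obtain ⟨p, hp, hfp⟩ := List.exists_of_findSome?_eq_some h
  by_cases hsw : PySem.Chars.startswith (cs.drop j) p.1.toList
  · rw [if_pos hsw] at hfp
    exact ⟨p, hp, (PySem.Chars.startswith_iff _ _).mp hsw, Option.some.inj hfp⟩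
  · rw [if_neg hsw] at hfp
    exact absurd hfp (by simp)

theorem matchAt_eq_some_iff {cs : List Char} {j : Nat} {v : String} :
    matchAt cs j = some v ↔ ∃ p ∈ numDict, p.1.toList <+: cs.drop j ∧ p.2 = v := by
  constructor
  · exact matchAt_eq_some_iff_aux
  · rintro ⟨p, hp, hpre, hv⟩
    rcases hfind : matchAt cs j with _ | v'
    · exfalso
      unfold matchAt at hfind
      rw [List.findSome?_eq_none_iff] at hfind
      have := hfind p hp
      rw [if_pos ((PySem.Chars.startswith_iff _ _).mpr hpre)] at this
      exact absurd this (by simp)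
    · obtain ⟨q, hq, hqpre, hqv⟩ := matchAt_eq_some_iff_aux hfind
      have hpq : p = q := by
        rcases List.prefix_or_prefix_of_prefix hpre hqpre with hc | hc
        · exact key_prefix_unique p hp q hq hc
        · exact (key_prefix_unique q hq p hp hc).symm
      rw [← hv, hpq, hqv]

theorem mem_pairsOf_iff_matchAt {cs : List Char} {j : Nat} {v : String} :
    (j, v) ∈ pairsOf cs ↔ j < cs.length ∧ matchAt cs j = some v := by
  rw [mem_pairsOf, matchAt_eq_some_iff]
  constructor
  · rintro ⟨p, hp, hv, hlen, hpre⟩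
    exact ⟨hlen, p, hp, hpre, hv⟩
  · rintro ⟨hlen, p, hp, hpre, hv⟩
    exact ⟨p, hp, hv, hlen, hpre⟩

-- ---------- characterizing the min/max folds ----------

theorem foldF_acc : ∀ (L : List (Nat × String)) (j : Nat) (v : String),
    ∃ (j' : Nat) (v' : String), L.foldl fstep (some (↑j : Int), some v) = (some (↑j' : Int), some v') ∧
      ((j', v') = (j, v) ∨ (j', v') ∈ L) ∧ j' ≤ j ∧ ∀ q ∈ L, j' ≤ q.1 := by
  intro L
  induction L with
  | nil =>
    intro j v
    exact ⟨j, v, by simp, Or.inl rfl, le_rfl, by simp⟩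
  | cons a tl ih =>
    intro j v
    rw [List.foldl_cons]
    by_cases ha : a.1 < j
    · rw [show fstep (some (↑j : Int), some v) a = (some (↑a.1 : Int), some a.2) from by
        simp [fstep, ltInf]; omega]
      obtain ⟨j', v', h1, h2, h3, h4⟩ := ih a.1 a.2
      refine ⟨j', v', h1, ?_, by omega, ?_⟩
      · rcases h2 with h2 | h2
        · exact Or.inr (h2 ▸ List.mem_cons_self)
        · exact Or.inr (List.mem_cons_of_mem _ h2)
      · intro q hq
        rcases List.mem_cons.mp hq with hq | hq
        · subst hq; omega
        · exact h4 q hq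
    · rw [show fstep (some (↑j : Int), some v) a = (some (↑j : Int), some v) from by
        simp [fstep, ltInf]; omega]
      obtain ⟨j', v', h1, h2, h3, h4⟩ := ih j v
      refine ⟨j', v', h1, ?_, h3, ?_⟩
      · rcases h2 with h2 | h2
        · exact Or.inl h2
        · exact Or.inr (List.mem_cons_of_mem _ h2)
      · intro q hq
        rcases List.mem_cons.mp hq with hq | hq
        · subst hq; omega
        · exact h4 q hq

theorem foldL_acc : ∀ (L : List (Nat × String)) (j : Nat) (v : String),
    ∃ (j' : Nat) (v' : String), L.foldl lstep (some (↑j : Int), some v) = (some (↑j' : Int), some v') ∧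
      ((j', v') = (j, v) ∨ (j', v') ∈ L) ∧ j ≤ j' ∧ ∀ q ∈ L, q.1 ≤ j' := by
  intro L
  induction L with
  | nil =>
    intro j v
    exact ⟨j, v, by simp, Or.inl rfl, le_rfl, by simp⟩
  | cons a tl ih =>
    intro j v
    rw [List.foldl_cons]
    by_cases ha : j < a.1
    · rw [show lstep (some (↑j : Int), some v) a = (some (↑a.1 : Int), some a.2) from by
        simp [lstep, gtNegInf]; omega]
      obtain ⟨j', v', h1, h2, h3, h4⟩ := ih a.1 a.2
      refine ⟨j', v', h1, ?_, by omega, ?_⟩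
      · rcases h2 with h2 | h2
        · exact Or.inr (h2 ▸ List.mem_cons_self)
        · exact Or.inr (List.mem_cons_of_mem _ h2)
      · intro q hq
        rcases List.mem_cons.mp hq with hq | hq
        · subst hq; omega
        · exact h4 q hq
    · rw [show lstep (some (↑j : Int), some v) a = (some (↑j : Int), some v) from by
        simp [lstep, gtNegInf]; omega]
      obtain ⟨j', v', h1, h2, h3, h4⟩ := ih j v
      refine ⟨j', v', h1, ?_, h3, ?_⟩
      · rcases h2 with h2 | h2
        · exact Or.inl h2
        · exact Or.inr (List.mem_cons_of_mem _ h2)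
      · intro q hq
        rcases List.mem_cons.mp hq with hq | hq
        · subst hq; omega
        · exact h4 q hq

theorem foldF_char {L : List (Nat × String)} (hL : L ≠ []) :
    ∃ (j : Nat) (v : String), L.foldl fstep (none, none) = (some (↑j : Int), some v) ∧
      (j, v) ∈ L ∧ ∀ q ∈ L, j ≤ q.1 := by
  cases L with
  | nil => exact absurd rfl hL
  | cons a tl =>
    rw [List.foldl_cons, show fstep (none, none) a = (some (↑a.1 : Int), some a.2) from by
      simp [fstep, ltInf]]
    obtain ⟨j', v', h1, h2, h3, h4⟩ := foldF_acc tl a.1 a.2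
    refine ⟨j', v', h1, ?_, ?_⟩
    · rcases h2 with h2 | h2
      · exact h2 ▸ List.mem_cons_self
      · exact List.mem_cons_of_mem _ h2
    · intro q hq
      rcases List.mem_cons.mp hq with hq | hq
      · subst hq; omega
      · exact h4 q hq

theorem foldL_char {L : List (Nat × String)} (hL : L ≠ []) :
    ∃ (j : Nat) (v : String), L.foldl lstep (none, none) = (some (↑j : Int), some v) ∧
      (j, v) ∈ L ∧ ∀ q ∈ L, q.1 ≤ j := by
  cases L with
  | nil => exact absurd rfl hL
  | cons a tl =>
    rw [List.foldl_cons, show lstep (none, none) a = (some (↑a.1 : Int), some a.2) from by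
      simp [lstep, gtNegInf]]
    obtain ⟨j', v', h1, h2, h3, h4⟩ := foldL_acc tl a.1 a.2
    refine ⟨j', v', h1, ?_, ?_⟩
    · rcases h2 with h2 | h2
      · exact h2 ▸ List.mem_cons_self
      · exact List.mem_cons_of_mem _ h2
    · intro q hq
      rcases List.mem_cons.mp hq with hq | hq
      · subst hq; omega
      · exact h4 q hq

-- ---------- B's scans pick the least / greatest matching position ----------

theorem findSome?_range_first {α : Type} (f : Nat → Option α) :
    ∀ (n j : Nat) (v : α), j < n → f j = some v → (∀ i, i < j → f i = none) →
      (List.range n).findSome? f = some v := by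
  intro n
  induction n with
  | zero => intro j v hj; omega
  | succ n ih =>
    intro j v hj hjv hnone
    rw [List.range_succ, List.findSome?_append]
    by_cases hlt : j < n
    · rw [ih j v hlt hjv hnone]
      rfl
    · have hjn : j = n := by omega
      have h0 : (List.range n).findSome? f = none := by
        rw [List.findSome?_eq_none_iff]
        intro i hi
        exact hnone i (by rw [List.mem_range] at hi; omega)
      rw [h0]
      simp [hjn ▸ hjv]

theorem findSome?_range_rev_last {α : Type} (f : Nat → Option α) :
    ∀ (n j : Nat) (v : α), j < n → f j = some v → (∀ i, j < i → i < n → f i = none) →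
      (List.range n).reverse.findSome? f = some v := by
  intro n
  induction n with
  | zero => intro j v hj; omega
  | succ n ih =>
    intro j v hj hjv hafter
    rw [List.range_succ, List.reverse_append]
    by_cases hjn : j = n
    · simp [hjn ▸ hjv]
    · have hn : f n = none := hafter n (by omega) (by omega)
      rw [List.reverse_cons, List.reverse_nil, List.nil_append,
        List.findSome?_append, show List.findSome? f [n] = none from by simp [hn],
        Option.none_or]
      exact ih j v (by omega) hjv (fun i h1 h2 => hafter i h1 (by omega))

-- ---------- main assembly ----------

theorem pairsOf_ne_nil {input_str : String} (hpre : Pre_get_first_last_numeric input_str) :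
    pairsOf input_str.toList ≠ [] := by
  unfold Pre_get_first_last_numeric at hpre
  rw [List.any_eq_true] at hpre
  obtain ⟨kv, hkv, hin⟩ := hpre
  rw [PySem.Str.isIn_eq] at hin
  rw [← PySem.Chars.exists_prefix_drop_iff_isIn] at hin
  obtain ⟨jj, hjj⟩ := hin
  have hne := key_nonempty kv hkv
  have hlen : jj < input_str.toList.length := by
    by_contra hc
    rw [List.drop_eq_nil_of_le (by omega)] at hjj
    exact hne (List.prefix_nil.mp hjj)
  exact List.ne_nil_of_mem (mem_pairsOf.mpr ⟨kv, hkv, rfl, hlen, hjj⟩)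

theorem main_eq (input_str : String) (hpre : Pre_get_first_last_numeric input_str) :
    get_first_last_numeric input_str = get_first_last_numeric_alt input_str := by
  have hpair := pairsOf_ne_nil hpre
  obtain ⟨j1, v1, hF, hmem1, hmin⟩ := foldF_char hpair
  obtain ⟨j2, v2, hL, hmem2, hmax⟩ := foldL_char hpair
  obtain ⟨hj1len, hM1⟩ := mem_pairsOf_iff_matchAt.mp hmem1
  obtain ⟨hj2len, hM2⟩ := mem_pairsOf_iff_matchAt.mp hmem2
  have hfirst : (List.range input_str.toList.length).findSome? (matchAt input_str.toList) = some v1 := by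
    apply findSome?_range_first _ _ j1 v1 hj1len hM1
    intro i hi
    rcases hMi : matchAt input_str.toList i with _ | w
    · rfl
    · exfalso
      have : (i, w) ∈ pairsOf input_str.toList :=
        mem_pairsOf_iff_matchAt.mpr ⟨by omega, hMi⟩
      have := hmin (i, w) this
      omega
  have hlast : (List.range input_str.toList.length).reverse.findSome? (matchAt input_str.toList) = some v2 := by
    apply findSome?_range_rev_last _ _ j2 v2 hj2len hM2
    intro i h1 h2
    rcases hMi : matchAt input_str.toList i with _ | w
    · rfl
    · exfalso
      have : (i, w) ∈ pairsOf input_str.toList :=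
        mem_pairsOf_iff_matchAt.mpr ⟨h2, hMi⟩
      have := hmax (i, w) this
      omega
  simp only [get_first_last_numeric, get_first_last_numeric_alt]
  rw [A_fold_pairs, fold_split, hfirst, hlast, hF, hL]

-- ===== VERDICT (by name: the statement is the Claim_ definition above) =====
theorem get_first_last_numeric_spec : Claim_equal_get_first_last_numeric := by
  intro input_str _ hpre
  unfold Spec_get_first_last_numeric
  exact main_eq input_str hpre
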